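-- pv_equiv track=rewrite | github.com/vquilon/mslearn-ai-language | Labfiles/07-speech/Python/speaking-clock/speaking-clock.py | detect_prosody
-- ===== SOURCE A (Python) =====
-- def detect_prosody(buffer):
--     # Validar que las etiquetas <prosody> y </prosody> estén balanceadas
--     stack = []
--     i = 0
--     while i < len(buffer):
--         if buffer[i:i+8] == "<prosody":
--             stack.append("<prosody")
--             i += 8
--         elif buffer[i:i+10] == "</prosody>":
--             if stack and stack[-1] == "<prosody":
--                 return True
--             else:
--                 return False
--             i += 10
--         else:
--             i += 1
--     return len(stack) != 0
-- ===== SOURCE B (Python) =====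
-- def detect_prosody(buffer):
--     # Two substring searches instead of a stateful character scan:
--     # the result depends only on the first "<prosody" and the first "</prosody>".
--     open_pos = buffer.find("<prosody")
--     close_pos = buffer.find("</prosody>")
--     if close_pos == -1:
--         return open_pos != -1
--     return open_pos != -1 and open_pos < close_pos
-- ===== Notes on version B (the rewrite author's own statement) =====
-- stated objective: simpler
-- what changed: Replaces the stateful character-by-character scan with a stack by two substring searches (str.find for '<prosody' and '</prosody>') and a closed boolean on the two positions.
import Mathlib
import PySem

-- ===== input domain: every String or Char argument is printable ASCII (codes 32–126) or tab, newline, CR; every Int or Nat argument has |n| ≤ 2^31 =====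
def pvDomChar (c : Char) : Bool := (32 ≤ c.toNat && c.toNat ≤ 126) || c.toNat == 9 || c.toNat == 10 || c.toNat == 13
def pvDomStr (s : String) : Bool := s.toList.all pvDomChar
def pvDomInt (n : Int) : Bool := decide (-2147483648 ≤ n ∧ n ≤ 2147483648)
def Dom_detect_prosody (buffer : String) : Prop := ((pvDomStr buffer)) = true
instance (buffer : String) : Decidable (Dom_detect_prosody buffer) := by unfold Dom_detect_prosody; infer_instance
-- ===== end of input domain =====

-- B replaces A's stateful character scan (with a stack) by two substring searches
-- and a comparison of the two first-occurrence positions; objective: simpler.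

-- ===== PORT A =====
-- A's while-loop over index i with its stack of "<prosody" strings; advancing i is
-- dropping from the remaining character list (8 on an open tag, 1 otherwise)
def detectGoA : List Char → List String → Bool
  | [], stack => !(stack.length == 0)
  | c :: rest, stack =>
    if (c :: rest).take 8 = "<prosody".toList then
      detectGoA ((c :: rest).drop 8) (stack ++ ["<prosody"])
    else if (c :: rest).take 10 = "</prosody>".toList then
      (!stack.isEmpty) && (stack.getLast? == some "<prosody")
    else
      detectGoA rest stack
termination_by l _ => l.length
decreasing_by all_goals simp

def detect_prosody (buffer : String) : Bool := detectGoA buffer.toList []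

-- ===== PORT B =====
def detect_prosody_alt (buffer : String) : Bool :=
  let open_pos := PySem.Str.find buffer "<prosody"
  let close_pos := PySem.Str.find buffer "</prosody>"
  if close_pos == -1 then open_pos != -1
  else (open_pos != -1) && decide (open_pos < close_pos)

-- ===== PRECONDITION & SPEC =====
def Spec_detect_prosody (buffer : String) (out : Bool) : Prop := out = detect_prosody_alt buffer
instance (buffer : String) (out : Bool) : Decidable (Spec_detect_prosody buffer out) := by unfold Spec_detect_prosody; infer_instance

-- ===== CLAIM (what is proved, stated in full; the proofs are below) =====
def Claim_equal_detect_prosody : Prop := ∀ (buffer : String), Dom_detect_prosody buffer → Spec_detect_prosody buffer (detect_prosody buffer)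

-- ===== LEMMAS AND PROOFS =====

theorem pv_find_eq_of_min (l sub : List Char) (k : Nat)
    (h1 : sub <+: l.drop k) (h2 : ∀ i < k, ¬ sub <+: l.drop i) :
    PySem.Chars.find l sub = (k : Int) := by
  have hin : sub <:+: l := h1.isInfix.trans (List.drop_suffix k l).isInfix
  have hnn : 0 ≤ PySem.Chars.find l sub := (PySem.Chars.find_nonneg_iff l sub).2 hin
  obtain ⟨hs1, hs2⟩ := PySem.Chars.find_spec hnn
  have hk : (PySem.Chars.find l sub).toNat = k := by
    rcases Nat.lt_trichotomy (PySem.Chars.find l sub).toNat k with h | h | h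
    · exact absurd hs1 (h2 _ h)
    · exact h
    · exact absurd h1 (hs2 _ h)
  omega

theorem pv_find_of_prefix (l sub : List Char) (h : sub <+: l) :
    PySem.Chars.find l sub = 0 := by
  have := pv_find_eq_of_min l sub 0 (by simpa using h) (by omega)
  simpa using this

theorem pv_find_cons (c : Char) (rest sub : List Char) (h : ¬ sub <+: c :: rest) :
    PySem.Chars.find (c :: rest) sub =
      if PySem.Chars.find rest sub = -1 then -1 else PySem.Chars.find rest sub + 1 := by
  by_cases hin : sub <:+: rest
  · have hnn : 0 ≤ PySem.Chars.find rest sub := (PySem.Chars.find_nonneg_iff rest sub).2 hin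
    obtain ⟨hs1, hs2⟩ := PySem.Chars.find_spec hnn
    set k := (PySem.Chars.find rest sub).toNat with hkdef
    have hval : PySem.Chars.find (c :: rest) sub = ((k + 1 : Nat) : Int) := by
      apply pv_find_eq_of_min
      · simpa using hs1
      · intro i hi
        cases i with
        | zero => simpa using h
        | succ j => simpa using hs2 j (by omega)
    have hne : ¬ PySem.Chars.find rest sub = -1 := by omega
    rw [hval, if_neg hne]
    omega
  · have h1 : PySem.Chars.find rest sub = -1 := (PySem.Chars.find_eq_neg_one_iff rest sub).2 hin
    have h2 : ¬ sub <:+: c :: rest := by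
      rw [List.infix_cons_iff]
      rintro (hp | hi)
      · exact h hp
      · exact hin hi
    rw [(PySem.Chars.find_eq_neg_one_iff _ sub).2 h2, h1, if_pos rfl]

theorem pv_not_prefix_of_take_ne_8 (l : List Char) (h : l.take 8 ≠ "<prosody".toList) :
    ¬ "<prosody".toList <+: l := by
  intro hp
  rw [List.prefix_iff_eq_take] at hp
  exact h hp.symm

theorem pv_not_prefix_of_take_ne_10 (l : List Char) (h : l.take 10 ≠ "</prosody>".toList) :
    ¬ "</prosody>".toList <+: l := by
  intro hp
  rw [List.prefix_iff_eq_take] at hp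
  exact h hp.symm

-- the scan's result, characterised by the first positions of the two tags
theorem pv_goA_eq (N : Nat) : ∀ (l : List Char) (n : Nat), l.length ≤ N →
    detectGoA l (List.replicate n "<prosody") =
      (if PySem.Chars.find l ("</prosody>".toList) = -1
       then decide (n ≠ 0 ∨ PySem.Chars.find l ("<prosody".toList) ≠ -1)
       else decide (n ≠ 0 ∨ (PySem.Chars.find l ("<prosody".toList) ≠ -1 ∧
              PySem.Chars.find l ("<prosody".toList) < PySem.Chars.find l ("</prosody>".toList)))) := by
  induction N with
  | zero =>
    intro l n hl
    have hnil : l = [] := List.eq_nil_of_length_eq_zero (by omega)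
    subst hnil
    have hcl : PySem.Chars.find ([] : List Char) ("</prosody>".toList) = -1 := by
      rw [PySem.Chars.find_eq_neg_one_iff]; simp [List.infix_nil]
    have hop : PySem.Chars.find ([] : List Char) ("<prosody".toList) = -1 := by
      rw [PySem.Chars.find_eq_neg_one_iff]; simp [List.infix_nil]
    rw [hcl, hop, if_pos rfl, detectGoA]
    by_cases hn : n = 0 <;> simp [hn]
  | succ N ih =>
    intro l n hl
    match l with
    | [] =>
      have hcl : PySem.Chars.find ([] : List Char) ("</prosody>".toList) = -1 := by
        rw [PySem.Chars.find_eq_neg_one_iff]; simp [List.infix_nil]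
      have hop : PySem.Chars.find ([] : List Char) ("<prosody".toList) = -1 := by
        rw [PySem.Chars.find_eq_neg_one_iff]; simp [List.infix_nil]
      rw [hcl, hop, if_pos rfl, detectGoA]
      by_cases hn : n = 0 <;> simp [hn]
    | c :: rest =>
      by_cases hop : (c :: rest).take 8 = "<prosody".toList
      · -- open tag at the front
        have hpre : "<prosody".toList <+: c :: rest := by
          rw [List.prefix_iff_eq_take]; exact hop.symm
        have hO : PySem.Chars.find (c :: rest) ("<prosody".toList) = 0 :=
          pv_find_of_prefix _ _ hpre
        have hlhs : detectGoA (c :: rest) (List.replicate n "<prosody") = true := by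
          rw [detectGoA, if_pos hop, ← List.replicate_succ']
          rw [ih ((c :: rest).drop 8) (n + 1) (by simp at hl ⊢; omega)]
          split_ifs <;> simp
        rw [hlhs]
        by_cases hC : PySem.Chars.find (c :: rest) ("</prosody>".toList) = -1
        · rw [if_pos hC, eq_comm, decide_eq_true_eq]
          exact Or.inr (by rw [hO]; decide)
        · have hCnn : 0 ≤ PySem.Chars.find (c :: rest) ("</prosody>".toList) := by
            have := PySem.Chars.neg_one_le_find (c :: rest) ("</prosody>".toList); omega
          have hCne0 : PySem.Chars.find (c :: rest) ("</prosody>".toList) ≠ 0 := by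
            intro h0
            obtain ⟨hs1, _⟩ := PySem.Chars.find_spec hCnn
            rw [h0] at hs1
            rw [Int.toNat_zero, List.drop_zero] at hs1
            obtain ⟨t1, e1⟩ := hpre
            obtain ⟨t2, e2⟩ := hs1
            have eop : "<prosody".toList = ['<','p','r','o','s','o','d','y'] := by decide
            have ecl : "</prosody>".toList = ['<','/','p','r','o','s','o','d','y','>'] := by decide
            rw [eop] at e1
            rw [ecl] at e2
            simp only [List.cons_append, List.nil_append] at e1 e2
            have he := e1.trans e2.symm
            simp only [List.cons.injEq] at he
            exact absurd he.2.1 (by decide)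
          rw [if_neg hC, eq_comm, decide_eq_true_eq]
          refine Or.inr ⟨by rw [hO]; decide, by rw [hO]; omega⟩
      · by_cases hcl : (c :: rest).take 10 = "</prosody>".toList
        · -- close tag at the front
          have hclpre : "</prosody>".toList <+: c :: rest := by
            rw [List.prefix_iff_eq_take]; exact hcl.symm
          have hC : PySem.Chars.find (c :: rest) ("</prosody>".toList) = 0 :=
            pv_find_of_prefix _ _ hclpre
          have hge := PySem.Chars.neg_one_le_find (c :: rest) ("<prosody".toList)
          have hOne0 : PySem.Chars.find (c :: rest) ("<prosody".toList) ≠ 0 := by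
            intro h0
            have hnn : 0 ≤ PySem.Chars.find (c :: rest) ("<prosody".toList) := by omega
            obtain ⟨hs1, _⟩ := PySem.Chars.find_spec hnn
            rw [h0] at hs1
            rw [Int.toNat_zero, List.drop_zero] at hs1
            exact pv_not_prefix_of_take_ne_8 _ hop hs1
          rw [detectGoA, if_neg hop, if_pos hcl, hC,
            if_neg (show ¬(0 : Int) = -1 by decide)]
          cases n with
          | zero =>
            simp only [List.replicate_zero, List.isEmpty_nil, Bool.not_true, Bool.false_and]
            rw [eq_comm, decide_eq_false_iff_not]
            rintro (h | ⟨h1, h2⟩)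
            · exact h rfl
            · omega
          | succ m =>
            have hL : (!(List.replicate (m + 1) "<prosody").isEmpty &&
                ((List.replicate (m + 1) "<prosody").getLast? == some "<prosody")) = true := by
              simp [List.getLast?_replicate]
            rw [hL, eq_comm, decide_eq_true_eq]
            exact Or.inl (by omega)
        · -- neither tag at the front: step by one character
          have hnp8 := pv_not_prefix_of_take_ne_8 _ hop
          have hnp10 := pv_not_prefix_of_take_ne_10 _ hcl
          rw [detectGoA, if_neg hop, if_neg hcl,
            ih rest n (by simp at hl; omega),
            pv_find_cons c rest _ hnp8, pv_find_cons c rest _ hnp10]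
          have hgeC := PySem.Chars.neg_one_le_find rest ("</prosody>".toList)
          have hgeO := PySem.Chars.neg_one_le_find rest ("<prosody".toList)
          split_ifs <;> rw [decide_eq_decide] <;> omega

-- the two first-occurrence positions determine both programs' answers identically
theorem pv_bool_eq (O C : Int) :
    (if C = -1 then decide ((0 : Nat) ≠ 0 ∨ O ≠ -1)
     else decide ((0 : Nat) ≠ 0 ∨ (O ≠ -1 ∧ O < C))) =
    (if C == -1 then !(O == -1) else (!(O == -1)) && decide (O < C)) := by
  by_cases hC : C = -1 <;> by_cases hO : O = -1 <;> simp [hC, hO]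

-- ===== VERDICT (by name: the statement is the Claim_ definition above) =====
theorem detect_prosody_spec : Claim_equal_detect_prosody := by
  unfold Claim_equal_detect_prosody
  intro buffer _
  unfold Spec_detect_prosody detect_prosody detect_prosody_alt
  have h := pv_goA_eq buffer.toList.length buffer.toList 0 (le_refl _)
  simp only [List.replicate_zero] at h
  rw [h]
  simp only [PySem.Str.find_eq]
  exact pv_bool_eq _ _
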